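-- pv_equiv track=rewrite | github.com/zym20000325/Lead | cleanPipeline_method2.py | combine_consecutive_strings
-- ===== SOURCE A (Python) =====
-- def combine_consecutive_strings(lst):
--     combined_strings = []
--     current_combined = []
--
--     for string in lst:
--         # Check if the string is all capital letters
--         is_all_caps = string.isupper()
--
--         if current_combined:
--             # If the current string has the same format as the previous one, combine them
--             if (is_all_caps and current_combined[-1].isupper()) or (not is_all_caps and not current_combined[-1].isupper()):
--                 current_combined.append(string)
--             else:
--                 # If the format changes, join the combined strings and reset
--                 combined_strings.append(' '.join(current_combined))
--                 current_combined = [string]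
--         else:
--             current_combined.append(string)
--
--     # Append the last set of combined strings
--     if current_combined:
--         combined_strings.append(' '.join(current_combined))
--
--     return combined_strings
-- ===== SOURCE B (Python) =====
-- def combine_consecutive_strings(lst):
--     # groupby-style: split the list into maximal runs of equal .isupper() key,
--     # join each run; no current-run accumulator / flush-on-change state.
--     out = []
--     rest = lst
--     while rest:
--         k = rest[0].isupper()
--         n = 1
--         while n < len(rest) and rest[n].isupper() == k:
--             n += 1
--         out.append(' '.join(rest[:n]))
--         rest = rest[n:]
--     return out
-- ===== Notes on version B (the rewrite author's own statement) =====
-- stated objective: alternative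
-- what changed: B splits the list into maximal consecutive runs of equal isupper() key (groupby-style span/rest decomposition) and joins each run, instead of A's single fold that maintains a current-run accumulator with flush-on-change logic and a trailing flush.
import Mathlib
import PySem

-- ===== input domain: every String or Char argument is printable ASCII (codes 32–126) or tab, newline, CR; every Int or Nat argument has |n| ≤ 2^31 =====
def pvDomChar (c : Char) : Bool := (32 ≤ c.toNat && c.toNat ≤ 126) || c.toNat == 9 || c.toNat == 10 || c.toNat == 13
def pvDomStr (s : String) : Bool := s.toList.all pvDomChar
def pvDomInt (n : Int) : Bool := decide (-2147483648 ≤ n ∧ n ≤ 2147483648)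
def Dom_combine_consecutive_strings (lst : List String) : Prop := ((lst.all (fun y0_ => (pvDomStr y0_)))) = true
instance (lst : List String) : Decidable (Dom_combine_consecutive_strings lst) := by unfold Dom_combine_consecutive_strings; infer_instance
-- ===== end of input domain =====

-- B groups maximal consecutive runs of equal isupper() key (span/rest) instead of A's
-- fold with a current-run accumulator and flush-on-change; objective: alternative structure.

-- shared primitive: str.isupper() — exact on the ASCII domain (cased chars = letters)
def pyIsupper (s : String) : Bool :=
  s.toList.any PySem.Chars.isalpha && s.toList.all (fun c => !PySem.Chars.islower c)

-- ===== PORT A =====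
def pvJoin (parts : List String) : String := PySem.Str.join " " parts

def pvStepA (acc : List String × List String) (s : String) : List String × List String :=
  let isAllCaps := pyIsupper s
  let cs := acc.1
  let cur := acc.2
  if h : cur ≠ [] then
    let lastUp := pyIsupper (cur.getLast h)   -- current_combined[-1].isupper()
    if (isAllCaps && lastUp) || (!isAllCaps && !lastUp) then (cs, cur ++ [s])
    else (cs ++ [pvJoin cur], [s])
  else (cs, cur ++ [s])

def combine_consecutive_strings (lst : List String) : List String :=
  let p := lst.foldl pvStepA ([], [])
  if p.2 ≠ [] then p.1 ++ [pvJoin p.2] else p.1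

-- ===== PORT B =====
-- pvSpan k l = (maximal prefix of l whose elements have isupper-key k, the rest)
def pvSpan (k : Bool) : List String → List String × List String
  | [] => ([], [])
  | s :: rest =>
    if pyIsupper s == k then
      let p := pvSpan k rest
      (s :: p.1, p.2)
    else ([], s :: rest)

theorem pvSpan_snd_length (k : Bool) (l : List String) : (pvSpan k l).2.length ≤ l.length := by
  induction l with
  | nil => simp [pvSpan]
  | cons s rest ih =>
    simp only [pvSpan]
    split
    · simpa using Nat.le_succ_of_le ih
    · simp

def pvGroups : List String → List (List String)
  | [] => []
  | s :: rest =>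
    (s :: (pvSpan (pyIsupper s) rest).1) :: pvGroups (pvSpan (pyIsupper s) rest).2
  termination_by l => l.length
  decreasing_by
    simp only [List.length_cons]
    exact Nat.lt_succ_of_le (pvSpan_snd_length _ _)

def combine_consecutive_strings_alt (lst : List String) : List String :=
  (pvGroups lst).map pvJoin

-- ===== PRECONDITION & SPEC =====
def Spec_combine_consecutive_strings (lst : List String) (out : List String) : Prop := out = combine_consecutive_strings_alt lst
instance (lst : List String) (out : List String) : Decidable (Spec_combine_consecutive_strings lst out) := by unfold Spec_combine_consecutive_strings; infer_instance

-- ===== CLAIM (what is proved, stated in full; the proofs are below) =====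
def Claim_equal_combine_consecutive_strings : Prop := ∀ (lst : List String), Dom_combine_consecutive_strings lst → Spec_combine_consecutive_strings lst (combine_consecutive_strings lst)

-- ===== LEMMAS AND PROOFS =====

theorem pvGroups_nil : pvGroups [] = [] := by rw [pvGroups]

theorem pvGroups_cons (s : String) (rest : List String) :
    pvGroups (s :: rest) =
      (s :: (pvSpan (pyIsupper s) rest).1) :: pvGroups (pvSpan (pyIsupper s) rest).2 := by
  rw [pvGroups]

-- the flush of the remaining run at the end of A's loop
def pvFinish (p : List String × List String) : List String :=
  if p.2 ≠ [] then p.1 ++ [pvJoin p.2] else p.1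

-- joined groups when the loop currently holds the nonempty run `cur` (all of key k)
def altAux (k : Bool) (cur l : List String) : List String :=
  pvJoin (cur ++ (pvSpan k l).1) :: (pvGroups (pvSpan k l).2).map pvJoin

theorem mainA (l : List String) : ∀ (cs cur : List String) (k : Bool),
    cur ≠ [] → (∀ c ∈ cur, pyIsupper c = k) →
    pvFinish (List.foldl pvStepA (cs, cur) l) = cs ++ altAux k cur l := by
  induction l with
  | nil =>
    intro cs cur k hne hk
    simp [pvFinish, altAux, pvSpan, pvGroups_nil, hne]
  | cons s t ih =>
    intro cs cur k hne hk
    have hlast : pyIsupper (cur.getLast hne) = k := hk _ (List.getLast_mem hne)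
    by_cases hsk : pyIsupper s = k
    · have hstep : pvStepA (cs, cur) s = (cs, cur ++ [s]) := by
        simp only [pvStepA, hne, dif_pos, hlast]
        cases hks : pyIsupper s <;> cases k <;> simp_all
      rw [List.foldl_cons, hstep,
        ih cs (cur ++ [s]) k (by simp) (by
          intro c hc
          rcases List.mem_append.mp hc with h | h
          · exact hk c h
          · simp at h; subst h; exact hsk)]
      simp only [altAux, pvSpan, hsk, beq_self_eq_true, if_pos]
      simp [List.append_assoc]
    · have hstep : pvStepA (cs, cur) s = (cs ++ [pvJoin cur], [s]) := by
        simp only [pvStepA, hne, dif_pos, hlast]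
        cases hks : pyIsupper s <;> cases k <;> simp_all
      rw [List.foldl_cons, hstep,
        ih (cs ++ [pvJoin cur]) [s] (pyIsupper s) (by simp) (by simp)]
      simp only [altAux, pvSpan, beq_iff_eq, hsk, if_neg, not_false_iff, pvGroups_cons]
      simp [List.append_assoc]

-- ===== VERDICT (by name: the statement is the Claim_ definition above) =====
theorem combine_consecutive_strings_spec : Claim_equal_combine_consecutive_strings := by
  intro lst _
  unfold Spec_combine_consecutive_strings
  cases lst with
  | nil => simp [combine_consecutive_strings, combine_consecutive_strings_alt, pvGroups_nil]
  | cons s rest =>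
    show combine_consecutive_strings (s :: rest) = _
    have hA : combine_consecutive_strings (s :: rest) =
        pvFinish (List.foldl pvStepA ([], []) (s :: rest)) := rfl
    have h0 : pvStepA ([], []) s = ([], [s]) := by simp [pvStepA]
    rw [hA, List.foldl_cons, h0,
      mainA rest [] [s] (pyIsupper s) (by simp) (by simp)]
    simp only [combine_consecutive_strings_alt, altAux, List.nil_append, pvGroups_cons]
    simp
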